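-- pv_equiv track=rewrite | github.com/lakii3741/AoC | 2024/day2.py | get_min_max_gap
-- ===== SOURCE A (Python) =====
-- from typing import List, Tuple
--
-- def get_min_max_gap(report:List[int]) -> Tuple[int,int]:
--     min_gap = -1
--     max_gap = -1
--
--     for index in range(1,len(report)):
--         size_gap = abs(report[index] - report[index - 1])
--         if min_gap == -1 or size_gap < min_gap:
--             min_gap = size_gap
--         if max_gap == -1 or size_gap > max_gap:
--             max_gap = size_gap
--
--     return min_gap, max_gap
-- ===== SOURCE B (Python) =====
-- from typing import List, Tuple
--
-- def get_min_max_gap(report: List[int]) -> Tuple[int, int]: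
--     gaps = sorted(abs(b - a) for a, b in zip(report, report[1:]))
--     if not gaps:
--         return (-1, -1)
--     return (gaps[0], gaps[-1])
-- ===== Notes on version B (the rewrite author's own statement) =====
-- stated objective: alternative
-- what changed: Instead of A's fused sentinel-tracking pass, B sorts the list of adjacent absolute gaps and reads the minimum and maximum off the ends of the sorted order.
import Mathlib
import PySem

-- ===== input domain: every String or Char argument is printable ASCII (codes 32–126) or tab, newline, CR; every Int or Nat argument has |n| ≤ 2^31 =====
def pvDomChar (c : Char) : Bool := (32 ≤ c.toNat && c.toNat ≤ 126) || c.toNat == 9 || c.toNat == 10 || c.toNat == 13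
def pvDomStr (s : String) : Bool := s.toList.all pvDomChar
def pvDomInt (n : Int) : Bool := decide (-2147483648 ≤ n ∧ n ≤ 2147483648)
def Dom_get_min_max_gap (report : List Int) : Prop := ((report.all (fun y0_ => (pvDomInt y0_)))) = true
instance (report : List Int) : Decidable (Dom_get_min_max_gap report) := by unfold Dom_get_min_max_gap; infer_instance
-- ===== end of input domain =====

-- B replaces A's fused sentinel-tracking min/max pass by sorting the adjacent
-- absolute gaps and reading the extrema off the two ends (objective: alternative).
-- ===== PORT A =====
def get_min_max_gap (report : List Int) : Int × Int :=
  let loop := (PySem.List.pyRange 1 (report.length) 1).foldl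
    (fun (s : Int × Int) (index : Int) =>
      let size_gap := |PySem.List.pyGetD report index 0 - PySem.List.pyGetD report (index - 1) 0|
      let min_gap := if s.1 = -1 ∨ size_gap < s.1 then size_gap else s.1
      let max_gap := if s.2 = -1 ∨ size_gap > s.2 then size_gap else s.2
      (min_gap, max_gap)) (-1, -1)
  loop

-- ===== PORT B =====
def get_min_max_gap_alt (report : List Int) : Int × Int :=
  let gaps := PySem.List.sorted
    ((report.zip (PySem.List.slice report (some 1) none)).map (fun p => |p.2 - p.1|))
    (fun x => x) false
  if _h : gaps = [] then (-1, -1)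
  else (PySem.List.pyGetD gaps 0 0, PySem.List.pyGetD gaps (-1) 0)

-- ===== PRECONDITION & SPEC =====
def Spec_get_min_max_gap (report : List Int) (out : Int × Int) : Prop := out = get_min_max_gap_alt report
instance (report : List Int) (out : Int × Int) : Decidable (Spec_get_min_max_gap report out) := by unfold Spec_get_min_max_gap; infer_instance

-- ===== CLAIM (what is proved, stated in full; the proofs are below) =====
def Claim_equal_get_min_max_gap : Prop := ∀ (report : List Int), Dom_get_min_max_gap report → Spec_get_min_max_gap report (get_min_max_gap report)

-- ===== LEMMAS AND PROOFS =====
-- gaps, as A's index loop sees them, are pairwise gaps of adjacent elements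
lemma gaps_eq (report : List Int) :
    (PySem.List.pyRange 1 (report.length) 1).map
      (fun i => |PySem.List.pyGetD report i 0 - PySem.List.pyGetD report (i - 1) 0|)
    = (report.zip report.tail).map (fun p => |p.2 - p.1|) := by
  apply List.ext_getElem
  · simp [PySem.List.length_pyRange_one]
  · intro k h1 h2
    simp only [List.getElem_map, PySem.List.getElem_pyRange_one, List.getElem_zip]
    have hk : k + 1 < report.length := by
      simp [PySem.List.length_pyRange_one] at h1; omega
    have e1 : (1 : Int) + (k : Int) - 1 = ((k : Nat) : Int) := by ring
    have e2 : (1 : Int) + (k : Int) = ((k+1 : Nat) : Int) := by push_cast; ring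
    rw [e1, e2, PySem.List.pyGetD_natCast, PySem.List.pyGetD_natCast]
    have ht : report.tail[k]'(by simpa using h2) = report[k+1]'hk := by
      simp [List.getElem_tail]
    rw [List.getD_eq_getElem _ _ hk, List.getD_eq_getElem _ _ (by omega), ht]

-- folding A's step starting from a nonnegative state is running min/max
lemma fold_step (gs : List Int) (hgs : ∀ g ∈ gs, 0 ≤ g) :
    ∀ mn mx, 0 ≤ mn → 0 ≤ mx →
    gs.foldl (fun (s : Int × Int) (g : Int) =>
      (if s.1 = -1 ∨ g < s.1 then g else s.1,
       if s.2 = -1 ∨ g > s.2 then g else s.2)) (mn, mx)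
    = (gs.foldl min mn, gs.foldl max mx) := by
  induction gs with
  | nil => intro mn mx _ _; simp
  | cons g t ih =>
    intro mn mx hmn hmx
    have hg : 0 ≤ g := hgs g (by simp)
    have ht : ∀ x ∈ t, 0 ≤ x := fun x hx => hgs x (by simp [hx])
    simp only [List.foldl_cons]
    have h1 : (if mn = -1 ∨ g < mn then g else mn) = min mn g := by
      split_ifs with h
      · rcases h with h | h <;> omega
      · rw [not_or] at h; omega
    have h2 : (if mx = -1 ∨ g > mx then g else mx) = max mx g := by
      split_ifs with h
      · rcases h with h | h <;> omega
      · rw [not_or] at h; omega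
    rw [h1, h2]
    exact ih ht (min mn g) (max mx g) (by omega) (by omega)

-- in a (≤)-sorted list every element is at most the last one
lemma le_getLast_of_pairwise (l : List Int) (hp : l.Pairwise (· ≤ ·)) (hne : l ≠ []) :
    ∀ x ∈ l, x ≤ l.getLast hne := by
  induction l with
  | nil => simp at hne
  | cons a t ih =>
    intro x hx
    cases t with
    | nil => simp at hx; simp [hx, List.getLast]
    | cons b u =>
      have hp' := List.pairwise_cons.mp hp
      rw [List.getLast_cons (by simp)]
      rcases List.mem_cons.mp hx with rfl | hx'
      · exact le_trans (hp'.1 _ (List.getLast_mem _)) (le_refl _)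
      · exact ih hp'.2 (by simp) x hx'

theorem get_min_max_gap_spec : Claim_equal_get_min_max_gap := by
  intro report _
  unfold Spec_get_min_max_gap get_min_max_gap get_min_max_gap_alt
  rw [PySem.List.slice_from_one]
  set gs := (report.zip report.tail).map (fun p => |p.2 - p.1|) with hgs_def
  have hfold : (PySem.List.pyRange 1 (report.length) 1).foldl
      (fun (s : Int × Int) (index : Int) =>
        let size_gap := |PySem.List.pyGetD report index 0 - PySem.List.pyGetD report (index - 1) 0|
        (if s.1 = -1 ∨ size_gap < s.1 then size_gap else s.1,
         if s.2 = -1 ∨ size_gap > s.2 then size_gap else s.2)) (-1, -1)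
      = gs.foldl
        (fun (s : Int × Int) (g : Int) =>
          (if s.1 = -1 ∨ g < s.1 then g else s.1,
           if s.2 = -1 ∨ g > s.2 then g else s.2)) (-1, -1) := by
    rw [hgs_def, ← gaps_eq, List.foldl_map]
  have hnn : ∀ g ∈ gs, 0 ≤ g := by
    intro g hgm
    rw [hgs_def] at hgm
    obtain ⟨p, _, rfl⟩ := List.mem_map.mp hgm
    exact abs_nonneg _
  show _ = (if h : PySem.List.sorted gs (fun x => x) false = [] then ((-1 : Int), (-1 : Int))
    else (PySem.List.pyGetD (PySem.List.sorted gs (fun x => x) false) 0 0,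
          PySem.List.pyGetD (PySem.List.sorted gs (fun x => x) false) (-1) 0))
  rw [hfold]
  cases hcase : gs with
  | nil =>
    simp [PySem.List.sorted]
  | cons g t =>
    have hg0 : 0 ≤ g := hnn g (by simp [hcase])
    have hnt : ∀ x ∈ t, 0 ≤ x := fun x hx => hnn x (by simp [hcase, hx])
    -- A's side: running min/max
    simp only [List.foldl_cons]
    rw [show (if True ∨ g < -1 then g else (-1 : Int)) = g from if_pos (Or.inl trivial),
        show (if True ∨ g > -1 then g else (-1 : Int)) = g from if_pos (Or.inl trivial)]
    rw [fold_step t hnt g g hg0 hg0]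
    -- B's side: the sorted list is nonempty
    have hsne : PySem.List.sorted (g :: t) (fun x => x) false ≠ [] := by
      intro h
      exact (List.cons_ne_nil g t) ((PySem.List.sorted_eq_nil_iff (g :: t) (fun x => x) false).mp h)
    rw [dif_neg hsne]
    obtain ⟨m, s, hms⟩ := List.exists_cons_of_ne_nil hsne
    -- characterize min via min?
    have hmin? : PySem.List.min? (g :: t) (fun x => x) = some (t.foldl min g) :=
      PySem.List.min?_id_cons g t
    have hmax? : PySem.List.max? (g :: t) (fun x => x) = some (t.foldl max g) :=
      PySem.List.max?_id_cons g t
    have hmin_mem : t.foldl min g ∈ g :: t := PySem.List.min?_mem hmin?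
    have hmin_isMin : ∀ y ∈ g :: t, t.foldl min g ≤ y := PySem.List.min?_isMin hmin?
    have hmax_mem : t.foldl max g ∈ g :: t := PySem.List.max?_mem hmax?
    have hmax_isMax : ∀ y ∈ g :: t, y ≤ t.foldl max g := PySem.List.max?_isMax hmax?
    -- head of sorted is the minimum
    have hm_le : ∀ y ∈ (g :: t), m ≤ y := PySem.List.key_head_sorted_le (g :: t) (fun x => x) hms
    have hm_mem : m ∈ (g :: t) := by
      have hmem : m ∈ PySem.List.sorted (g :: t) (fun x => x) false := by simp [hms]
      exact (PySem.List.mem_sorted (g :: t) (fun x => x) false m).mp hmem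
    have hhead : m = t.foldl min g :=
      le_antisymm (hm_le _ hmin_mem) (hmin_isMin m hm_mem)
    -- last of sorted is the maximum
    have hpw : (PySem.List.sorted (g :: t) (fun x => x) false).Pairwise (· ≤ ·) := by
      simpa using PySem.List.sorted_pairwise (g :: t) (fun x => x)
    have hlast_mem : (PySem.List.sorted (g :: t) (fun x => x) false).getLast hsne ∈ (g :: t) :=
      (PySem.List.mem_sorted (g :: t) (fun x => x) false _).mp (List.getLast_mem hsne)
    have hlast_ge : ∀ x ∈ (g :: t),
        x ≤ (PySem.List.sorted (g :: t) (fun x => x) false).getLast hsne := by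
      intro x hx
      exact le_getLast_of_pairwise _ hpw hsne x ((PySem.List.mem_sorted (g :: t) (fun x => x) false x).mpr hx)
    have hlast : (PySem.List.sorted (g :: t) (fun x => x) false).getLast hsne = t.foldl max g :=
      le_antisymm (hmax_isMax _ hlast_mem) (hlast_ge _ hmax_mem)
    rw [PySem.List.pyGetD_neg_one _ 0 hsne, hlast]
    rw [hms, PySem.List.pyGetD_zero_cons, ← hhead]

-- ===== VERDICT (by name: the statement is the Claim_ definition above) =====
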